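-- pv_equiv track=rewrite | github.com/Mehralizada/algorithms | task5.py | distribute_tickets
-- ===== SOURCE A (Python) =====
-- def distribute_tickets(tickets, groups=None, depth=0):
--     if groups is None:
--         groups = []
--
--     if not tickets:
--         return groups
--
--     # Hər dəfə ən yüksək nömrəli bileti seç (pivot)
--     pivot = max(tickets)
--     groups.append([pivot])  # Yeni qrup yaradılır
--
--     # Pivotdan böyük və ya kiçik bilet olmadığı üçün qalan biletlər
--     remaining_tickets = [ticket for ticket in tickets if ticket != pivot]
--
--     # Rekursiv olaraq qalan biletləri bölüşdür
--     distribute_tickets(remaining_tickets, groups, depth + 1)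
--
--     return groups
-- ===== SOURCE B (Python) =====
-- def distribute_tickets(tickets, groups=None, depth=0):
--     if groups is None:
--         groups = []
--     if not tickets:
--         return groups
--     prev = object()  # unique sentinel: first element always differs
--     for t in sorted(tickets, reverse=True):
--         if t != prev:
--             groups.append([t])
--             prev = t
--     return groups
-- ===== Notes on version B (the rewrite author's own statement) =====
-- stated objective: faster
-- what changed: Replaces the repeated-max recursion (recompute max and filter the whole list per distinct value) with one descending sort followed by a single adjacent-duplicate-skipping pass.
import Mathlib
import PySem

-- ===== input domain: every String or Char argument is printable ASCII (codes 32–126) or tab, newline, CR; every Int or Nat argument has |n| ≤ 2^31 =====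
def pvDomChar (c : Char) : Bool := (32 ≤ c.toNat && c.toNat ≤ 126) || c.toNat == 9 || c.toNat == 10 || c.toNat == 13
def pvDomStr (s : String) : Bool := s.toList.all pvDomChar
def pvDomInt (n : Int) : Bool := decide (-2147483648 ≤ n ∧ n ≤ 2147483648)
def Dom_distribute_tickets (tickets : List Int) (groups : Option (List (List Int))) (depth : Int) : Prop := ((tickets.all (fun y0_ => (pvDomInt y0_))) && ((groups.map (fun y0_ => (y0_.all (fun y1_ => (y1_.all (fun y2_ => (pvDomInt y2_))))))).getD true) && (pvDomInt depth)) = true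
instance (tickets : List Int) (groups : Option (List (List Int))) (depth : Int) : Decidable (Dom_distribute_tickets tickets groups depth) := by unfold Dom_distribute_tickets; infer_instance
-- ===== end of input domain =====

-- B replaces A's repeated-max recursion by one descending sort plus a single duplicate-skipping
-- pass (objective: faster). Both A and B append the new groups into a caller-supplied `groups`
-- list and return that same object; the theorems here are about the return value.

-- ===== PORT A =====
-- termination helper, cited by the port's decreasing_by: Python's max of a nonempty list is a member
theorem pvPivot_mem (tickets : List Int) (h : tickets ≠ []) :
    ((PySem.List.max? tickets (fun x => x)).getD 0) ∈ tickets := by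
  cases hm : PySem.List.max? tickets (fun x => x) with
  | none => exact absurd ((PySem.List.max?_eq_none_iff tickets (fun x => x)).mp hm) h
  | some m => simpa using PySem.List.max?_mem hm

-- the recursive body of A: `if not tickets: return groups`, pick pivot = max(tickets),
-- append [pivot], recurse on the != pivot filter; the recursive call returns the same
-- (mutated) groups, so the value returned is the recursive call's value
def pvDistAux (tickets : List Int) (groups : List (List Int)) (depth : Int) : List (List Int) :=
  if h : tickets = [] then groups
  else
    let pivot := (PySem.List.max? tickets (fun x => x)).getD 0
    pvDistAux (tickets.filter (fun t => t != pivot)) (groups ++ [[pivot]]) (depth + 1)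
termination_by tickets.length
decreasing_by
  simp only [List.length_unattach]
  have h2 : (List.filter (fun x : {x // x ∈ tickets} =>
      ↑x != (PySem.List.max? tickets fun x => x).getD 0) tickets.attach).length
      < tickets.attach.length :=
    List.length_filter_lt_length_iff_exists.mpr
      ⟨⟨_, pvPivot_mem tickets h⟩, List.mem_attach _ _, by simp⟩
  simpa using h2

def distribute_tickets (tickets : List Int) (groups : Option (List (List Int))) (depth : Int) : List (List Int) :=
  pvDistAux tickets (groups.getD []) depth

-- ===== PORT B =====
-- `groups = [] if None`; for nonempty tickets iterate once over sorted(tickets, reverse=True),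
-- appending [t] only when t differs from the previously emitted value (state = (groups, prev);
-- Python's sentinel `object()` is `none` here: the first element always differs)
def distribute_tickets_alt (tickets : List Int) (groups : Option (List (List Int))) (depth : Int) : List (List Int) :=
  let g := groups.getD []
  if tickets = [] then g
  else
    ((PySem.List.sorted tickets (fun x => x) true).foldl
      (fun (acc : List (List Int) × Option Int) t =>
        if some t ≠ acc.2 then (acc.1 ++ [[t]], some t) else acc)
      (g, none)).1

-- ===== PRECONDITION & SPEC =====
def Spec_distribute_tickets (tickets : List Int) (groups : Option (List (List Int))) (depth : Int) (out : List (List Int)) : Prop := out = distribute_tickets_alt tickets groups depth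
instance (tickets : List Int) (groups : Option (List (List Int))) (depth : Int) (out : List (List Int)) : Decidable (Spec_distribute_tickets tickets groups depth out) := by unfold Spec_distribute_tickets; infer_instance

-- ===== CLAIM (what is proved, stated in full; the proofs are below) =====
def Claim_equal_distribute_tickets : Prop := ∀ (tickets : List Int) (groups : Option (List (List Int))) (depth : Int), Dom_distribute_tickets tickets groups depth → Spec_distribute_tickets tickets groups depth (distribute_tickets tickets groups depth)

-- ===== LEMMAS AND PROOFS =====

-- what B's fold emits after the initial groups: one singleton per value change
def pvEmit : List Int → Option Int → List (List Int)
  | [], _ => []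
  | t :: ts, prev => if some t ≠ prev then [t] :: pvEmit ts (some t) else pvEmit ts prev

theorem pvFold_eq (s : List Int) (g : List (List Int)) (prev : Option Int) :
    (s.foldl
      (fun (acc : List (List Int) × Option Int) t =>
        if some t ≠ acc.2 then (acc.1 ++ [[t]], some t) else acc)
      (g, prev)).1 = g ++ pvEmit s prev := by
  induction s generalizing g prev with
  | nil => simp [pvEmit]
  | cons t ts ih =>
    simp only [List.foldl_cons]
    by_cases h : some t = prev
    · simpa [pvEmit, h] using ih g prev
    · simpa [pvEmit, h, List.append_assoc] using ih (g ++ [[t]]) (some t)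

theorem pvEmit_skip (c : Nat) (p : Int) (s : List Int) :
    pvEmit (List.replicate c p ++ s) (some p) = pvEmit s (some p) := by
  induction c with
  | zero => simp
  | succ c ih => simpa [List.replicate_succ, pvEmit] using ih

theorem pvEmit_replicate (c : Nat) (hc : 0 < c) (p : Int) (s : List Int) :
    pvEmit (List.replicate c p ++ s) none = [p] :: pvEmit s (some p) := by
  obtain ⟨c', rfl⟩ : ∃ c', c = c' + 1 := ⟨c - 1, by omega⟩
  simp [List.replicate_succ, pvEmit, pvEmit_skip]

theorem pvEmit_none_of_not_mem (s : List Int) (p : Int) (h : p ∉ s) :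
    pvEmit s (some p) = pvEmit s none := by
  cases s with
  | nil => rfl
  | cons u us =>
    have hu : u ≠ p := fun he => h (he ▸ List.mem_cons_self)
    simp [pvEmit, hu]

-- descending sort splits as: all copies of the maximum, then the descending sort of the rest
theorem pvSorted_split (tickets : List Int) (p : Int) (hmem : p ∈ tickets)
    (hmax : ∀ y ∈ tickets, y ≤ p) :
    PySem.List.sorted tickets (fun x => x) true
      = List.replicate (tickets.count p) p
        ++ PySem.List.sorted (tickets.filter (fun t => t != p)) (fun x => x) true := by
  have hperm : (PySem.List.sorted tickets (fun x => x) true).Perm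
      (List.replicate (tickets.count p) p
        ++ PySem.List.sorted (tickets.filter (fun t => t != p)) (fun x => x) true) := by
    refine (PySem.List.sorted_perm tickets (fun x => x) true).trans ?_
    refine ((List.filter_append_perm (· == p) tickets).symm.trans ?_)
    rw [List.filter_beq]
    exact (List.Perm.append_left _
      (PySem.List.sorted_perm (tickets.filter (fun t => t != p)) (fun x => x) true).symm)
  refine List.Perm.eq_of_pairwise (le := fun a b : Int => b ≤ a)
    (fun a b _ _ h1 h2 => le_antisymm h2 h1) ?_ ?_ hperm
  · exact PySem.List.sorted_pairwise_rev tickets (fun x => x)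
  · rw [List.pairwise_append]
    refine ⟨List.pairwise_replicate.mpr (Or.inr le_rfl), ?_, ?_⟩
    · exact PySem.List.sorted_pairwise_rev _ (fun x => x)
    · intro a ha b hb
      have : a = p := List.eq_of_mem_replicate ha
      subst this
      have hb' := (PySem.List.mem_sorted _ _ _ _).mp hb
      exact hmax b (List.mem_of_mem_filter hb')

-- A's recursion computes: initial groups ++ B's one-pass emission over the descending sort
theorem pvAux_eq (n : Nat) : ∀ (tickets : List Int), tickets.length ≤ n →
    ∀ (groups : List (List Int)) (depth : Int),
    pvDistAux tickets groups depth
      = groups ++ pvEmit (PySem.List.sorted tickets (fun x => x) true) none := by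
  induction n with
  | zero =>
    intro tickets hlen groups depth
    have : tickets = [] := List.length_eq_zero_iff.mp (Nat.le_zero.mp hlen)
    subst this
    rw [pvDistAux.eq_def]; simp [pvEmit, PySem.List.sorted]
  | succ n ih =>
    intro tickets hlen groups depth
    by_cases h : tickets = []
    · subst h; rw [pvDistAux.eq_def]; simp [pvEmit, PySem.List.sorted]
    · rw [pvDistAux.eq_def]
      simp only [h, dite_false]
      set pivot := (PySem.List.max? tickets (fun x => x)).getD 0 with hp
      have hmem : pivot ∈ tickets := pvPivot_mem tickets h
      have hmax : ∀ y ∈ tickets, y ≤ pivot := by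
        cases hm : PySem.List.max? tickets (fun x => x) with
        | none => exact absurd ((PySem.List.max?_eq_none_iff tickets (fun x => x)).mp hm) h
        | some m =>
          intro y hy
          have := PySem.List.max?_isMax hm y hy
          simpa [hp, hm] using this
      have hrest : (tickets.filter (fun t => t != pivot)).length < tickets.length :=
        List.length_filter_lt_length_iff_exists.mpr ⟨pivot, hmem, by simp⟩
      rw [ih (tickets.filter (fun t => t != pivot)) (by omega) (groups ++ [[pivot]]) (depth + 1)]
      rw [pvSorted_split tickets pivot hmem hmax]
      have hc : 0 < tickets.count pivot := List.count_pos_iff.mpr hmem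
      rw [pvEmit_replicate _ hc]
      rw [pvEmit_none_of_not_mem _ pivot (by
        intro hin
        have := (PySem.List.mem_sorted _ _ _ _).mp hin
        have := List.of_mem_filter this
        simp at this)]
      simp

-- ===== VERDICT (by name: the statement is the Claim_ definition above) =====
theorem distribute_tickets_spec : Claim_equal_distribute_tickets := by
  intro tickets groups depth _
  show distribute_tickets tickets groups depth = distribute_tickets_alt tickets groups depth
  unfold distribute_tickets distribute_tickets_alt
  rw [pvAux_eq tickets.length tickets le_rfl]
  by_cases h : tickets = []
  · subst h; simp [pvEmit, PySem.List.sorted]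
  · simp only [h, if_false]
    rw [pvFold_eq]
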